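-- pv_equiv track=rewrite | github.com/UchechiUcheAjike/CSE111-codes | esteem.py | computePositive
-- ===== SOURCE A (Python) =====
-- def computePositive(p_list):
--   total = 0
--   for item in p_list:
--     if item == 'D':
--       answer = 0
--     elif item == 'd':
--       answer = 1
--     elif item == 'a':
--       answer = 2
--     else:
--       answer = 3
--     total += answer
--   return total
-- ===== SOURCE B (Python) =====
-- def computePositive(p_list):
--   # Closed form: every item is worth 3 except 'D' (-3), 'd' (-2), 'a' (-1).
--   return (3 * len(p_list)
--           - 3 * p_list.count('D')
--           - 2 * p_list.count('d')
--           - p_list.count('a'))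
-- ===== Notes on version B (the rewrite author's own statement) =====
-- stated objective: alternative
-- what changed: Replaces the per-element if/elif accumulation with a counting closed form: 3*len minus weighted counts of 'D', 'd' and 'a' via list.count.
import Mathlib
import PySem

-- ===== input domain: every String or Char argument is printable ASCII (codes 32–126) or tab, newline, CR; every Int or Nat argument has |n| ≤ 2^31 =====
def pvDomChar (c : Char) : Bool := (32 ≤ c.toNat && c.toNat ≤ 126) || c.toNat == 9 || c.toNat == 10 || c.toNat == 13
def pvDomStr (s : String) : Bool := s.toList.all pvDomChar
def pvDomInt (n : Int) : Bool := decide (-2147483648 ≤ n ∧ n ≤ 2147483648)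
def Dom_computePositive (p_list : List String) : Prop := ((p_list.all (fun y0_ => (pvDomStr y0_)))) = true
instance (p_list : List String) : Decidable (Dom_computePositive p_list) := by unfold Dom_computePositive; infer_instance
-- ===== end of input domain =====

-- B replaces A's per-element accumulation with a counting closed form (alternative, same cost).

-- ===== PORT A =====
def computePositive (p_list : List String) : Int :=
  p_list.foldl (fun total item =>
    let answer : Int :=
      if item = "D" then 0
      else if item = "d" then 1
      else if item = "a" then 2
      else 3
    total + answer) 0

-- ===== PORT B =====
def computePositive_alt (p_list : List String) : Int :=
  3 * (p_list.length : Int)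
    - 3 * (PySem.List.count p_list "D")
    - 2 * (PySem.List.count p_list "d")
    - (PySem.List.count p_list "a")

-- ===== PRECONDITION & SPEC =====
def Spec_computePositive (p_list : List String) (out : Int) : Prop := out = computePositive_alt p_list
instance (p_list : List String) (out : Int) : Decidable (Spec_computePositive p_list out) := by unfold Spec_computePositive; infer_instance

-- ===== CLAIM (what is proved, stated in full; the proofs are below) =====
def Claim_equal_computePositive : Prop := ∀ (p_list : List String), Dom_computePositive p_list → Spec_computePositive p_list (computePositive p_list)

-- ===== LEMMAS AND PROOFS =====
theorem count_cons_str (x : String) (xs : List String) (y : String) :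
    PySem.List.count (x :: xs) y = (if x = y then 1 else 0) + PySem.List.count xs y := by
  simp [PySem.List.count, List.count_cons, beq_iff_eq]
  by_cases h : x = y <;> simp [h] <;> omega

theorem computePositive_foldl (p_list : List String) (t : Int) :
    p_list.foldl (fun total item =>
      let answer : Int :=
        if item = "D" then 0
        else if item = "d" then 1
        else if item = "a" then 2
        else 3
      total + answer) t = t + computePositive_alt p_list := by
  induction p_list generalizing t with
  | nil => simp [computePositive_alt, PySem.List.count]
  | cons x xs ih =>
    simp only [List.foldl_cons, ih, computePositive_alt, List.length_cons,
      count_cons_str]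
    by_cases hD : x = "D" <;> by_cases hd : x = "d" <;> by_cases ha : x = "a" <;>
      simp_all <;> push_cast <;> ring

-- ===== VERDICT (by name: the statement is the Claim_ definition above) =====
theorem computePositive_spec : Claim_equal_computePositive := by
  intro p_list _
  unfold Spec_computePositive computePositive
  simpa using computePositive_foldl p_list 0
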